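-- pv_equiv track=rewrite | github.com/HusamMTU/PodcastAnything-Local | src/podcast_anything_local/services/audio.py | _join_spoken_lines
-- ===== SOURCE A (Python) =====
-- def _join_spoken_lines(lines: list[str]) -> str:
--     merged: list[str] = []
--     for line in lines:
--         if line == "":
--             if merged and merged[-1] != "":
--                 merged.append("")
--             continue
--         merged.append(line)
--
--     while merged and merged[0] == "":
--         merged.pop(0)
--     while merged and merged[-1] == "":
--         merged.pop()
--     return "\n".join(merged).strip()
-- ===== SOURCE B (Python) =====
-- def _join_spoken_lines(lines: list[str]) -> str:
--     anchors = [(i, line) for i, line in enumerate(lines) if line != ""]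
--     out: list[str] = []
--     prev = None
--     for i, line in anchors:
--         if prev is not None and i > prev + 1:
--             out.append("")
--         out.append(line)
--         prev = i
--     return "\n".join(out).strip()
-- ===== Notes on version B (the rewrite author's own statement) =====
-- stated objective: alternative
-- what changed: Instead of A's mutate-as-you-go list (append blank sentinels, then pop leading/trailing blanks in while loops), B collects the non-blank lines with their indices in one comprehension and emits a single separator blank exactly when consecutive anchor indices leave a gap, so no trimming passes are needed.
import Mathlib
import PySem

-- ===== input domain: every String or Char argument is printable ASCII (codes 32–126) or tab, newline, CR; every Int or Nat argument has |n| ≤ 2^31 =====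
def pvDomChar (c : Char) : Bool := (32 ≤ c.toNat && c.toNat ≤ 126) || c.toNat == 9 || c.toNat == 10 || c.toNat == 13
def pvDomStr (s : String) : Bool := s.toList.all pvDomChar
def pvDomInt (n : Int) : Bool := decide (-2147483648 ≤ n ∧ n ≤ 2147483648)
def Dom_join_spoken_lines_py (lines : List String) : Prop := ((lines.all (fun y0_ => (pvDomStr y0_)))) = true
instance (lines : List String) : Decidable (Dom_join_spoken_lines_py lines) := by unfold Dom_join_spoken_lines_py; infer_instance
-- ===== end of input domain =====

-- B replaces A's append-sentinel-then-trim list surgery by a single pass over the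
-- non-blank (index, line) anchors, emitting a separator blank from index gaps (objective: alternative).

-- ===== PORT A =====
-- the for-loop of A: accumulate `merged`, inserting "" only after a non-blank tail
def pvA_loop : List String → List String → List String
  | merged, [] => merged
  | merged, line :: rest =>
      if line = "" then
        if merged ≠ [] ∧ merged.getLast? ≠ some "" then
          pvA_loop (merged ++ [""]) rest
        else
          pvA_loop merged rest
      else
        pvA_loop (merged ++ [line]) rest

-- `while merged and merged[0] == "": merged.pop(0)`
def pvA_dropLead : List String → List String
  | [] => []
  | x :: xs => if x = "" then pvA_dropLead xs else x :: xs

-- `while merged and merged[-1] == "": merged.pop()`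
def pvA_dropTrail (xs : List String) : List String :=
  if h : xs.getLast? = some "" then  -- h used by decreasing_by
    pvA_dropTrail xs.dropLast
  else
    xs
termination_by xs.length
decreasing_by
  have hne : xs ≠ [] := by intro hnil; rw [hnil] at h; simp at h
  have := List.length_pos_iff.mpr hne
  simp [List.length_dropLast]; omega

def join_spoken_lines_py (lines : List String) : String :=
  PySem.Str.strip (PySem.Str.join "\n" (pvA_dropTrail (pvA_dropLead (pvA_loop [] lines))))

-- ===== PORT B =====
-- B's loop over the anchors: emit "" before an anchor whose index leaves a gap
def pvB_emit : Option Int → List (Int × String) → List String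
  | _, [] => []
  | prev, (i, line) :: rest =>
      (match prev with
       | some p => if i > p + 1 then [""] else []
       | none => []) ++ (line :: pvB_emit (some i) rest)

def join_spoken_lines_py_alt (lines : List String) : String :=
  let anchors := (PySem.List.enumerate lines).filter (fun p => p.2 ≠ "")
  PySem.Str.strip (PySem.Str.join "\n" (pvB_emit none anchors))

-- ===== PRECONDITION & SPEC =====
def Spec_join_spoken_lines_py (lines : List String) (out : String) : Prop := out = join_spoken_lines_py_alt lines
instance (lines : List String) (out : String) : Decidable (Spec_join_spoken_lines_py lines out) := by unfold Spec_join_spoken_lines_py; infer_instance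

-- ===== CLAIM (what is proved, stated in full; the proofs are below) =====
def Claim_equal_join_spoken_lines_py : Prop := ∀ (lines : List String), Dom_join_spoken_lines_py lines → Spec_join_spoken_lines_py lines (join_spoken_lines_py lines)

-- ===== LEMMAS AND PROOFS =====

-- accumulator-free description of pvA_loop's work: the Bool is "merged nonempty with non-blank last"
def pvCore : Bool → List String → List String
  | _, [] => []
  | b, l :: rest =>
      if l = "" then
        (if b then "" :: pvCore false rest else pvCore false rest)
      else
        l :: pvCore true rest

-- structural (front-to-back) version of trailing-blank removal
def pvTrimR : List String → List String
  | [] => []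
  | x :: l =>
      match pvTrimR l with
      | [] => if x = "" then [] else [x]
      | t => x :: t

theorem pvA_loop_eq (ls : List String) : ∀ merged : List String,
    pvA_loop merged ls
      = merged ++ pvCore (decide (merged ≠ []) && decide (merged.getLast? ≠ some "")) ls := by
  induction ls with
  | nil => intro merged; simp [pvA_loop, pvCore]
  | cons l rest ih =>
    intro merged
    by_cases hl : l = ""
    · subst hl
      by_cases hc : merged ≠ [] ∧ merged.getLast? ≠ some ""
      · rw [pvA_loop, if_pos rfl, if_pos hc, ih]
        simp [pvCore, hc.1, hc.2]
      · rw [pvA_loop, if_pos rfl, if_neg hc, ih]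
        rcases not_and_or.mp hc with h | h
        · simp at h
          simp [pvCore, h]
        · simp at h
          by_cases hm : merged = [] <;> simp [pvCore, hm, h]
    · rw [pvA_loop, if_neg hl, ih]
      simp [pvCore, hl]

theorem pvCore_false_head (ls : List String) :
    pvA_dropLead (pvCore false ls) = pvCore false ls := by
  induction ls with
  | nil => simp [pvCore, pvA_dropLead]
  | cons l rest ih =>
    by_cases hl : l = "" <;> simp [pvCore, hl, pvA_dropLead, ih]

theorem pvTrimR_append (l : List String) (x : String) :
    pvTrimR (l ++ [x]) = if x = "" then pvTrimR l else l ++ [x] := by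
  induction l with
  | nil =>
    by_cases hx : x = "" <;> simp [pvTrimR, hx]
  | cons y l ih =>
    by_cases hx : x = ""
    · simp only [List.cons_append, pvTrimR, ih, if_pos hx]
    · simp only [List.cons_append, pvTrimR, ih, if_neg hx]
      cases l <;> simp

theorem pvA_dropTrail_append (l : List String) (x : String) :
    pvA_dropTrail (l ++ [x]) = if x = "" then pvA_dropTrail l else l ++ [x] := by
  by_cases hx : x = ""
  · rw [pvA_dropTrail]
    simp [hx]
  · rw [pvA_dropTrail]
    simp [hx]

theorem pvA_dropTrail_eq_trimR (l : List String) : pvA_dropTrail l = pvTrimR l := by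
  induction l using List.reverseRecOn with
  | nil => rw [pvA_dropTrail]; simp [pvTrimR]
  | append_singleton l x ih =>
    rw [pvA_dropTrail_append, pvTrimR_append]
    by_cases hx : x = "" <;> simp [hx, ih]

theorem pvTrimR_cons_ne (x : String) (hx : x ≠ "") (t : List String) :
    pvTrimR (x :: t) = x :: pvTrimR t := by
  rw [pvTrimR]
  cases h : pvTrimR t <;> simp [hx]

-- the heart: B's emit over the filtered enumeration equals A's trimmed core, in all three loop states
theorem pvMain (ls : List String) : ∀ k : Int,
    (pvB_emit none (((PySem.List.enumerate ls k).filter (fun p => p.2 ≠ ""))) = pvTrimR (pvCore false ls))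
    ∧ (∀ p : Int, p + 1 = k →
        pvB_emit (some p) (((PySem.List.enumerate ls k).filter (fun p => p.2 ≠ ""))) = pvTrimR (pvCore true ls))
    ∧ (∀ p : Int, p + 1 < k →
        pvB_emit (some p) (((PySem.List.enumerate ls k).filter (fun p => p.2 ≠ ""))) = pvTrimR ("" :: pvCore false ls)) := by
  induction ls with
  | nil =>
    intro k
    refine ⟨?_, fun p _ => ?_, fun p _ => ?_⟩ <;>
      simp [PySem.List.enumerate_nil, pvB_emit, pvCore, pvTrimR]
  | cons l rest ih =>
    intro k
    by_cases hl : l = ""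
    · subst hl
      refine ⟨?_, fun p hp => ?_, fun p hp => ?_⟩ <;>
        · rw [PySem.List.enumerate_cons]
          simp only [List.filter_cons, decide_eq_true_eq]
          rw [if_neg (by simp)]
          first
          | exact (ih (k + 1)).1
          | ( rw [(ih (k + 1)).2.2 p (by omega)]
              simp [pvCore] )
    · have hcore : pvCore false (l :: rest) = l :: pvCore true rest := by simp [pvCore, hl]
      have hcore' : pvCore true (l :: rest) = l :: pvCore true rest := by simp [pvCore, hl]
      refine ⟨?_, fun p hp => ?_, fun p hp => ?_⟩
      · rw [PySem.List.enumerate_cons]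
        simp only [List.filter_cons, decide_eq_true_eq]
        rw [if_pos (by simpa using hl), pvB_emit, (ih (k + 1)).2.1 k rfl]
        rw [hcore, pvTrimR_cons_ne l hl]
        rfl
      · rw [PySem.List.enumerate_cons]
        simp only [List.filter_cons, decide_eq_true_eq]
        rw [if_pos (by simpa using hl), pvB_emit]
        rw [if_neg (by omega), (ih (k + 1)).2.1 k rfl]
        rw [hcore', pvTrimR_cons_ne l hl]
        rfl
      · rw [PySem.List.enumerate_cons]
        simp only [List.filter_cons, decide_eq_true_eq]
        rw [if_pos (by simpa using hl), pvB_emit]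
        rw [if_pos (by omega), (ih (k + 1)).2.1 k rfl]
        rw [hcore, pvTrimR, pvTrimR_cons_ne l hl]
        simp

-- ===== VERDICT (by name: the statement is the Claim_ definition above) =====
theorem join_spoken_lines_py_spec : Claim_equal_join_spoken_lines_py := by
  intro lines _
  unfold Spec_join_spoken_lines_py join_spoken_lines_py join_spoken_lines_py_alt
  have h1 := pvA_loop_eq lines []
  simp only [List.nil_append] at h1
  have h2 : (decide (([] : List String) ≠ []) && decide (([] : List String).getLast? ≠ some "")) = false := by decide
  rw [h1, h2, pvCore_false_head, pvA_dropTrail_eq_trimR]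
  show _ = PySem.Str.strip (PySem.Str.join "\n"
    (pvB_emit none (((PySem.List.enumerate lines 0).filter (fun p => p.2 ≠ "")))))
  rw [(pvMain lines 0).1]
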